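-- pv_equiv track=rewrite | github.com/Orpheon/Vanguard | mapconverter/gg2mapparser.py | associateteamswspawns
-- ===== SOURCE A (Python) =====
-- def associateteamswspawns(spawnrects, redspawns, bluespawns):
--     reds = []
--     blues = []
--     for (x1, y1, x2, y2) in spawnrects:
--         isred = False
--         for spawn in redspawns:
--             if x1 <= spawn[0] and spawn[0] <= x2:
--                 if y1 <= spawn[1] and spawn[1] <= y2:
--                     isred = True
--         isblue = False
--         for spawn in bluespawns:
--             if x1 <= spawn[0] and spawn[0] <= x2:
--                 if y1 <= spawn[1] and spawn[1] <= y2: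
--                     isblue = True
--
--         if isred and isblue:
--             pass
--         elif isred:
--             reds.append((x1, y1, x2, y2))
--         elif isblue:
--             blues.append((x1, y1, x2, y2))
--     return reds, blues
-- ===== SOURCE B (Python) =====
-- def associateteamswspawns(spawnrects, redspawns, bluespawns):
--     # Transposed traversal: iterate spawns in the outer loop and mark, per
--     # rectangle index, whether any red / blue spawn lies inside; then one
--     # filtering pass over the rectangles builds both result lists.
--     n = len(spawnrects)
--     red_hit = [False] * n
--     blue_hit = [False] * n
--     for sx, sy in redspawns:
--         for i, (x1, y1, x2, y2) in enumerate(spawnrects):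
--             if x1 <= sx <= x2 and y1 <= sy <= y2:
--                 red_hit[i] = True
--     for sx, sy in bluespawns:
--         for i, (x1, y1, x2, y2) in enumerate(spawnrects):
--             if x1 <= sx <= x2 and y1 <= sy <= y2:
--                 blue_hit[i] = True
--     reds = [r for i, r in enumerate(spawnrects) if red_hit[i] and not blue_hit[i]]
--     blues = [r for i, r in enumerate(spawnrects) if blue_hit[i] and not red_hit[i]]
--     return reds, blues
-- ===== Notes on version B (the rewrite author's own statement) =====
-- stated objective: alternative
-- what changed: Transposed the loop nest: B iterates spawns in the outer loop marking per-rectangle boolean hit arrays, then builds both result lists in a single filtering pass, instead of A's per-rectangle rescans of both spawn lists with an elif accumulator chain.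
import Mathlib
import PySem

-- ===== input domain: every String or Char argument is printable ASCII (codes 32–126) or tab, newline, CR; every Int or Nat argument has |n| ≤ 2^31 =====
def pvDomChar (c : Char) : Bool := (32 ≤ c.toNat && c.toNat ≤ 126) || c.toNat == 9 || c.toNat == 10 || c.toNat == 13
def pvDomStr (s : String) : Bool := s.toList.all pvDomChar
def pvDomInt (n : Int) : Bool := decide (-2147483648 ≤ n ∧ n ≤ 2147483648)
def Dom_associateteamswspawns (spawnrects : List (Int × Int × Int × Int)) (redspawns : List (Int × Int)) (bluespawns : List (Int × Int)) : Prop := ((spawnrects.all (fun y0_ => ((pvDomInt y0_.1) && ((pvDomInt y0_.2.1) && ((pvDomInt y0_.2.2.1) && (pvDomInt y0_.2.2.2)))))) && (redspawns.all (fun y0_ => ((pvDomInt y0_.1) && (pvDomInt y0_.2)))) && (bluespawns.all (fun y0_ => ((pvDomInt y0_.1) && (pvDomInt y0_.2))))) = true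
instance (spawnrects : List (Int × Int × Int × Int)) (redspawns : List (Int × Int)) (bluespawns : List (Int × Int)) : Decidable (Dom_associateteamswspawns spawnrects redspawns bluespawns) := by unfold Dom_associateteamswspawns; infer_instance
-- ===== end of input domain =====

-- B transposes the loop nest (spawns outer, marking per-rectangle hit flags, then one
-- filtering pass) instead of A's per-rectangle rescans; alternative structure, same cost.

-- ===== PORT A =====
-- A's inner "for spawn in …" loop updating the isred/isblue flag
def innerA (x1 y1 x2 y2 : Int) (spawns : List (Int × Int)) : Bool :=
  spawns.foldl (fun b spawn =>
    if x1 ≤ spawn.1 ∧ spawn.1 ≤ x2 then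
      if y1 ≤ spawn.2 ∧ spawn.2 ≤ y2 then true else b
    else b) false

def associateteamswspawns (spawnrects : List (Int × Int × Int × Int)) (redspawns : List (Int × Int)) (bluespawns : List (Int × Int)) : (List (Int × Int × Int × Int)) × (List (Int × Int × Int × Int)) :=
  spawnrects.foldl (fun acc r =>
    let (x1, y1, x2, y2) := r
    let isred := innerA x1 y1 x2 y2 redspawns
    let isblue := innerA x1 y1 x2 y2 bluespawns
    if isred && isblue then acc
    else if isred then (acc.1 ++ [(x1, y1, x2, y2)], acc.2)
    else if isblue then (acc.1, acc.2 ++ [(x1, y1, x2, y2)])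
    else acc) ([], [])

-- ===== PORT B =====
-- exact port of B's inner "for i, (x1,y1,x2,y2) in enumerate(spawnrects): if …: hits[i] = True":
-- the positional update of hits is the positional zipWith over rects and hits
def markHits (rects : List (Int × Int × Int × Int)) (hits : List Bool) (s : Int × Int) : List Bool :=
  List.zipWith (fun r h =>
    let (x1, y1, x2, y2) := r
    if x1 ≤ s.1 ∧ s.1 ≤ x2 ∧ y1 ≤ s.2 ∧ s.2 ≤ y2 then true else h) rects hits

def associateteamswspawns_alt (spawnrects : List (Int × Int × Int × Int)) (redspawns : List (Int × Int)) (bluespawns : List (Int × Int)) : (List (Int × Int × Int × Int)) × (List (Int × Int × Int × Int)) :=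
  let red_hit := redspawns.foldl (markHits spawnrects) (List.replicate spawnrects.length false)
  let blue_hit := bluespawns.foldl (markHits spawnrects) (List.replicate spawnrects.length false)
  -- the comprehensions "[r for i, r in enumerate(spawnrects) if …hit[i] …]"
  let reds := (spawnrects.zip (red_hit.zip blue_hit)).filterMap
      (fun rb => if rb.2.1 && !rb.2.2 then some rb.1 else none)
  let blues := (spawnrects.zip (red_hit.zip blue_hit)).filterMap
      (fun rb => if rb.2.2 && !rb.2.1 then some rb.1 else none)
  (reds, blues)

-- ===== PRECONDITION & SPEC =====
def Spec_associateteamswspawns (spawnrects : List (Int × Int × Int × Int)) (redspawns : List (Int × Int)) (bluespawns : List (Int × Int)) (out : (List (Int × Int × Int × Int)) × (List (Int × Int × Int × Int))) : Prop := out = associateteamswspawns_alt spawnrects redspawns bluespawns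
instance (spawnrects : List (Int × Int × Int × Int)) (redspawns : List (Int × Int)) (bluespawns : List (Int × Int)) (out : (List (Int × Int × Int × Int)) × (List (Int × Int × Int × Int))) : Decidable (Spec_associateteamswspawns spawnrects redspawns bluespawns out) := by unfold Spec_associateteamswspawns; infer_instance

-- ===== CLAIM (what is proved, stated in full; the proofs are below) =====
def Claim_equal_associateteamswspawns : Prop := ∀ (spawnrects : List (Int × Int × Int × Int)) (redspawns : List (Int × Int)) (bluespawns : List (Int × Int)), Dom_associateteamswspawns spawnrects redspawns bluespawns → Spec_associateteamswspawns spawnrects redspawns bluespawns (associateteamswspawns spawnrects redspawns bluespawns)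

-- ===== LEMMAS AND PROOFS =====

-- the canonical "rectangle r contains some spawn of the list" predicate
def hasSpawn (r : Int × Int × Int × Int) (spawns : List (Int × Int)) : Bool :=
  spawns.any (fun s => decide (r.1 ≤ s.1 ∧ s.1 ≤ r.2.2.1 ∧ r.2.1 ≤ s.2 ∧ s.2 ≤ r.2.2.2))

lemma innerA_eq (x1 y1 x2 y2 : Int) (spawns : List (Int × Int)) :
    innerA x1 y1 x2 y2 spawns = hasSpawn (x1, y1, x2, y2) spawns := by
  have step : ∀ (b : Bool) (s : Int × Int),
      (if x1 ≤ s.1 ∧ s.1 ≤ x2 then if y1 ≤ s.2 ∧ s.2 ≤ y2 then true else b else b)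
        = (b || decide (x1 ≤ s.1 ∧ s.1 ≤ x2 ∧ y1 ≤ s.2 ∧ s.2 ≤ y2)) := by
    intro b s
    split_ifs with h1 h2
    · have h : x1 ≤ s.1 ∧ s.1 ≤ x2 ∧ y1 ≤ s.2 ∧ s.2 ≤ y2 := ⟨h1.1, h1.2, h2.1, h2.2⟩
      simp [h]
    · have h : ¬(x1 ≤ s.1 ∧ s.1 ≤ x2 ∧ y1 ≤ s.2 ∧ s.2 ≤ y2) := by tauto
      simp [h]
    · have h : ¬(x1 ≤ s.1 ∧ s.1 ≤ x2 ∧ y1 ≤ s.2 ∧ s.2 ≤ y2) := by tauto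
      simp [h]
  have aux : ∀ (l : List (Int × Int)) (b : Bool),
      l.foldl (fun b spawn =>
        if x1 ≤ spawn.1 ∧ spawn.1 ≤ x2 then
          if y1 ≤ spawn.2 ∧ spawn.2 ≤ y2 then true else b
        else b) b = (b || hasSpawn (x1, y1, x2, y2) l) := by
    intro l
    induction l with
    | nil => intro b; simp [hasSpawn]
    | cons s t ih =>
      intro b
      rw [List.foldl_cons, step, ih]
      simp [hasSpawn, Bool.or_assoc]
  simpa [innerA] using aux spawns false

lemma zipWith_congr' {α β γ : Type} (f g : α → β → γ) (l1 : List α) (l2 : List β)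
    (h : ∀ a b, f a b = g a b) : List.zipWith f l1 l2 = List.zipWith g l1 l2 := by
  induction l1 generalizing l2 with
  | nil => simp
  | cons a t ih => cases l2 <;> simp [h, ih]

lemma zipWith_zipWith {α β γ : Type} (f : α → β → γ) (g : α → β → β) (l1 : List α) (l2 : List β) :
    List.zipWith f l1 (List.zipWith g l1 l2) = List.zipWith (fun a b => f a (g a b)) l1 l2 := by
  induction l1 generalizing l2 with
  | nil => simp
  | cons a t ih => cases l2 <;> simp [ih]

lemma zipWith_snd {α β : Type} (l1 : List α) (l2 : List β) (h : l2.length = l1.length) :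
    List.zipWith (fun _ b => b) l1 l2 = l2 := by
  induction l1 generalizing l2 with
  | nil => cases l2 <;> simp_all
  | cons a t ih => cases l2 <;> simp_all

lemma markFold (rects : List (Int × Int × Int × Int)) (spawns : List (Int × Int))
    (hits : List Bool) (hlen : hits.length = rects.length) :
    spawns.foldl (markHits rects) hits =
      List.zipWith (fun r h => h || hasSpawn r spawns) rects hits := by
  induction spawns generalizing hits with
  | nil =>
    simp only [List.foldl_nil, hasSpawn, List.any_nil]
    rw [show (fun (r : Int × Int × Int × Int) (h : Bool) => h || false) = fun _ h => h by
      funext r h; simp]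
    exact (zipWith_snd _ _ hlen).symm
  | cons s t ih =>
    have hlen' : (markHits rects hits s).length = rects.length := by
      simp [markHits, hlen]
    rw [List.foldl_cons, ih _ hlen', markHits, zipWith_zipWith]
    apply zipWith_congr'
    intro r h
    obtain ⟨x1, y1, x2, y2⟩ := r
    simp only [hasSpawn, List.any_cons]
    by_cases hc : x1 ≤ s.1 ∧ s.1 ≤ x2 ∧ y1 ≤ s.2 ∧ s.2 ≤ y2 <;> simp [hc]

lemma zipWith_replicate (rects : List (Int × Int × Int × Int)) (f : Int × Int × Int × Int → Bool) :
    List.zipWith (fun r h => h || f r) rects (List.replicate rects.length false) =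
      rects.map f := by
  induction rects with
  | nil => simp
  | cons r t ih => simp [List.replicate, ih]

lemma filterMap_zip_maps (rects : List (Int × Int × Int × Int))
    (f g : Int × Int × Int × Int → Bool) (p : Bool → Bool → Bool) :
    (rects.zip ((rects.map f).zip (rects.map g))).filterMap
        (fun rb => if p rb.2.1 rb.2.2 then some rb.1 else none) =
      rects.filter (fun r => p (f r) (g r)) := by
  induction rects with
  | nil => simp
  | cons r t ih =>
    simp only [List.map_cons, List.zip_cons_cons, List.filterMap_cons, List.filter_cons]
    by_cases h : p (f r) (g r) = true <;> simp [h, ih]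

lemma outerA (redspawns bluespawns : List (Int × Int)) (rects : List (Int × Int × Int × Int))
    (acc : (List (Int × Int × Int × Int)) × (List (Int × Int × Int × Int))) :
    rects.foldl (fun acc r =>
      let (x1, y1, x2, y2) := r
      let isred := innerA x1 y1 x2 y2 redspawns
      let isblue := innerA x1 y1 x2 y2 bluespawns
      if isred && isblue then acc
      else if isred then (acc.1 ++ [(x1, y1, x2, y2)], acc.2)
      else if isblue then (acc.1, acc.2 ++ [(x1, y1, x2, y2)])
      else acc) acc =
    (acc.1 ++ rects.filter (fun r => hasSpawn r redspawns && !hasSpawn r bluespawns),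
     acc.2 ++ rects.filter (fun r => hasSpawn r bluespawns && !hasSpawn r redspawns)) := by
  induction rects generalizing acc with
  | nil => simp
  | cons r t ih =>
    obtain ⟨x1, y1, x2, y2⟩ := r
    rw [List.foldl_cons, ih]
    simp only [innerA_eq, List.filter_cons]
    cases hr : hasSpawn (x1, y1, x2, y2) redspawns <;>
      cases hb : hasSpawn (x1, y1, x2, y2) bluespawns <;> simp [hr, hb]

-- ===== VERDICT (by name: the statement is the Claim_ definition above) =====
theorem associateteamswspawns_spec : Claim_equal_associateteamswspawns := by
  intro rects redspawns bluespawns _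
  show _ = _
  rw [associateteamswspawns, associateteamswspawns_alt, outerA,
      markFold rects redspawns _ (by simp),
      markFold rects bluespawns _ (by simp),
      zipWith_replicate rects (fun r => hasSpawn r redspawns),
      zipWith_replicate rects (fun r => hasSpawn r bluespawns),
      filterMap_zip_maps rects _ _ (fun a b => a && !b),
      filterMap_zip_maps rects _ _ (fun a b => b && !a)]
  simp
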